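-- pv_equiv track=rewrite | github.com/deepakasu67/leetcode | OA/Shashwat Amazon OA/Q1.py | close_to_target
-- ===== SOURCE A (Python) =====
-- from collections import defaultdict
--
-- def close_to_target(forwardRouteList, returnRouteList, maxTravelDist):
--     max_miles_till_now = float('-inf')
--     res = defaultdict(list)
--
--     for f in forwardRouteList:
--         id1 = f[0]
--         miles1 = f[1]
--         if miles1 >= maxTravelDist:
--             continue
--         for r in returnRouteList:
--             id2, miles2 = r[0], r[1]
--             if miles2 >= maxTravelDist:
--                 continue
--             if miles1 + miles2 <= maxTravelDist and miles1+miles2 >= max_miles_till_now: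
--                 res[miles1 + miles2].append([id1,id2])
--                 max_miles_till_now = miles1 + miles2
--
--     return res[max_miles_till_now ]
-- ===== SOURCE B (Python) =====
-- def close_to_target(forwardRouteList, returnRouteList, maxTravelDist):
--     fwd = [(f[0], f[1]) for f in forwardRouteList if f[1] < maxTravelDist]
--     buckets = {}
--     for r in returnRouteList:
--         if r[1] < maxTravelDist:
--             buckets.setdefault(r[1], []).append(r[0])
--     best = None
--     for _, m1 in fwd:
--         for m2 in buckets:
--             s = m1 + m2
--             if s <= maxTravelDist and (best is None or s > best):
--                 best = s
--     if best is None: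
--         return []
--     return [[id1, id2] for id1, m1 in fwd for id2 in buckets.get(best - m1, [])]
-- ===== Notes on version B (the rewrite author's own statement) =====
-- stated objective: faster
-- what changed: A makes one nested pass over all forward×return entries, accumulating a defaultdict of id-pair lists keyed by every running-best sum and finally indexing it at the last best; B first groups return ids into a dict keyed by mileage, finds the best sum by scanning forward entries against the DISTINCT return mileages (the dict's keys), and emits the answer by direct bucket lookup per forward entry.
-- outside the precondition, e.g. on close_to_target([[1, 5]], [[9]], 3): A returns [], B raises IndexError
import Mathlib
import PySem

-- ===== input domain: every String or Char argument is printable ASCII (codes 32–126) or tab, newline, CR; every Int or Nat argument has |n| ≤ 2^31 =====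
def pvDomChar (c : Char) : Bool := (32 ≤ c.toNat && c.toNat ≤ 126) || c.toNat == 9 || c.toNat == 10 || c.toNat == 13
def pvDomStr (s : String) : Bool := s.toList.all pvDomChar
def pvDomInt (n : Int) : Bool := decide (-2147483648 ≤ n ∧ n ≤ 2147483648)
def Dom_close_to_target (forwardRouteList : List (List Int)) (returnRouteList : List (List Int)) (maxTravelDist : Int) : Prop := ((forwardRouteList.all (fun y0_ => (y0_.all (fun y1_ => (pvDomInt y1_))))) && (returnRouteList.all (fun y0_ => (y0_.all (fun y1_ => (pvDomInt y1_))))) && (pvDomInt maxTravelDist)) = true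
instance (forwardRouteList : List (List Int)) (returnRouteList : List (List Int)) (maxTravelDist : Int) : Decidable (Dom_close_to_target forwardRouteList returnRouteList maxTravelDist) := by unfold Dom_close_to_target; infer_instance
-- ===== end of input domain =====

-- B replaces A's single nested pass (defaultdict of pair-lists keyed by the running best sum) by:
-- best sum taken over the DISTINCT return mileages (grouped once into a dict of ids), then direct
-- bucket-lookup emission; equivalence is proved on inputs whose route entries have ≥ 2 elements (Pre_).

-- ===== PORT A =====
-- xs[i] accessor shared by both ports; under Pre_ every access is in range, so the .getD 0 default never fires
def pvGetI (r : List Int) (i : Int) : Int := (PySem.List.pyGet? r i).getD 0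

-- float('-inf') is modelled as `none`; pvGeB b s is Python's  s >= max_miles_till_now
def pvGeB (b : Option Int) (s : Int) : Bool :=
  match b with
  | none => true
  | some m => decide (m ≤ s)

-- the loop of A: state = (max_miles_till_now, res)
def pvAState (forwardRouteList : List (List Int)) (returnRouteList : List (List Int)) (maxTravelDist : Int) : Option Int × PySem.Dict Int (List (List Int)) :=
  forwardRouteList.foldl
    (fun (st : Option Int × PySem.Dict Int (List (List Int))) f =>
      let id1 := pvGetI f 0
      let miles1 := pvGetI f 1
      if miles1 ≥ maxTravelDist then st
      else returnRouteList.foldl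
        (fun st r =>
          let id2 := pvGetI r 0
          let miles2 := pvGetI r 1
          if miles2 ≥ maxTravelDist then st
          else if miles1 + miles2 ≤ maxTravelDist && pvGeB st.1 (miles1 + miles2) then
            (some (miles1 + miles2), st.2.modify (miles1 + miles2) [] (· ++ [[id1, id2]]))
          else st)
        st)
    (none, PySem.Dict.empty)

def close_to_target (forwardRouteList : List (List Int)) (returnRouteList : List (List Int)) (maxTravelDist : Int) : List (List Int) :=
  match (pvAState forwardRouteList returnRouteList maxTravelDist).1 with
  | none => []                     -- res[-inf] on the untouched defaultdict
  | some v => (pvAState forwardRouteList returnRouteList maxTravelDist).2.getD v []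

-- ===== PORT B =====
-- `best is None or s > best`
def pvGtB (b : Option Int) (s : Int) : Bool :=
  match b with
  | none => true
  | some m => decide (m < s)

-- fwd = [(f[0], f[1]) for f in forwardRouteList if f[1] < maxTravelDist]
def pvBFwd (forwardRouteList : List (List Int)) (maxTravelDist : Int) : List (Int × Int) :=
  (forwardRouteList.filter (fun f => decide (pvGetI f 1 < maxTravelDist))).map
    (fun f => (pvGetI f 0, pvGetI f 1))

-- buckets.setdefault(r[1], []).append(r[0])
def pvBBuckets (returnRouteList : List (List Int)) (maxTravelDist : Int) : PySem.Dict Int (List Int) :=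
  returnRouteList.foldl
    (fun (d : PySem.Dict Int (List Int)) r =>
      if pvGetI r 1 < maxTravelDist then d.modify (pvGetI r 1) [] (· ++ [pvGetI r 0]) else d)
    PySem.Dict.empty

-- the best-sum loop over fwd and the dict's (distinct) keys
def pvBBest (fwd : List (Int × Int)) (buckets : PySem.Dict Int (List Int)) (maxTravelDist : Int) : Option Int :=
  fwd.foldl
    (fun b p =>
      buckets.keys.foldl
        (fun b m2 => if p.2 + m2 ≤ maxTravelDist && pvGtB b (p.2 + m2) then some (p.2 + m2) else b)
        b)
    none

def close_to_target_alt (forwardRouteList : List (List Int)) (returnRouteList : List (List Int)) (maxTravelDist : Int) : List (List Int) :=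
  match pvBBest (pvBFwd forwardRouteList maxTravelDist) (pvBBuckets returnRouteList maxTravelDist) maxTravelDist with
  | none => []
  | some v =>
    (pvBFwd forwardRouteList maxTravelDist).flatMap
      (fun p => ((pvBBuckets returnRouteList maxTravelDist).getD (v - p.2) []).map (fun id2 => [p.1, id2]))

-- ===== PRECONDITION & SPEC =====
-- Pre_ requires every route entry (forward and return) to have at least two elements: Python A raises
-- IndexError on short entries it reaches; inputs with short RETURN entries that A happens never to reach
-- (because no forward entry passes the mileage filter) are excluded too, since A's returning [] there is
-- an artefact of its lazy short-circuiting, while B always scans the whole return list.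
def Pre_close_to_target (forwardRouteList : List (List Int)) (returnRouteList : List (List Int)) (maxTravelDist : Int) : Prop :=
  (∀ f ∈ forwardRouteList, 2 ≤ f.length) ∧ (∀ r ∈ returnRouteList, 2 ≤ r.length)
instance (forwardRouteList : List (List Int)) (returnRouteList : List (List Int)) (maxTravelDist : Int) : Decidable (Pre_close_to_target forwardRouteList returnRouteList maxTravelDist) := by unfold Pre_close_to_target; infer_instance

def pvWitness_close_to_target : List (List Int) × List (List Int) × Int := ([[1, 2], [2, 3]], [[5, 4], [6, 2]], 6)

def Spec_close_to_target (forwardRouteList : List (List Int)) (returnRouteList : List (List Int)) (maxTravelDist : Int) (out : List (List Int)) : Prop := out = close_to_target_alt forwardRouteList returnRouteList maxTravelDist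
instance (forwardRouteList : List (List Int)) (returnRouteList : List (List Int)) (maxTravelDist : Int) (out : List (List Int)) : Decidable (Spec_close_to_target forwardRouteList returnRouteList maxTravelDist out) := by unfold Spec_close_to_target; infer_instance

-- ===== CLAIM (what is proved, stated in full; the proofs are below) =====
def Claim_equal_close_to_target : Prop := ∀ (forwardRouteList : List (List Int)) (returnRouteList : List (List Int)) (maxTravelDist : Int), Dom_close_to_target forwardRouteList returnRouteList maxTravelDist → Pre_close_to_target forwardRouteList returnRouteList maxTravelDist → Spec_close_to_target forwardRouteList returnRouteList maxTravelDist (close_to_target forwardRouteList returnRouteList maxTravelDist)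

-- ===== LEMMAS AND PROOFS =====

@[simp] lemma pvGeB_none (s : Int) : pvGeB none s = true := rfl
@[simp] lemma pvGeB_some (m s : Int) : pvGeB (some m) s = decide (m ≤ s) := rfl
@[simp] lemma pvGtB_none (s : Int) : pvGtB none s = true := rfl
@[simp] lemma pvGtB_some (m s : Int) : pvGtB (some m) s = decide (m < s) := rfl

-- entries passing the mileage filter, as (id, miles) pairs (definitionally equal to pvBFwd)
def pvKeep (l : List (List Int)) (T : Int) : List (Int × Int) :=
  (l.filter (fun f => decide (pvGetI f 1 < T))).map (fun f => (pvGetI f 0, pvGetI f 1))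

-- the (forward, return) pairs A's nested loop runs over
def pvPairs (fwdL retL : List (List Int)) (T : Int) : List ((Int × Int) × (Int × Int)) :=
  (pvKeep fwdL T).flatMap (fun p => (pvKeep retL T).map (fun q => (p, q)))

def pvSum (pq : (Int × Int) × (Int × Int)) : Int := pq.1.2 + pq.2.2

-- one step of A's loop, on an (id,miles)-pair of pairs
def pvPairStep (T : Int) (st : Option Int × PySem.Dict Int (List (List Int))) (pq : (Int × Int) × (Int × Int)) : Option Int × PySem.Dict Int (List (List Int)) :=
  if pvSum pq ≤ T && pvGeB st.1 (pvSum pq) then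
    (some (pvSum pq), st.2.modify (pvSum pq) [] (· ++ [[pq.1.1, pq.2.1]]))
  else st

def pvAStep (T : Int) (b : Option Int) (s : Int) : Option Int :=
  if s ≤ T && pvGeB b s then some s else b

def pvBStep (T : Int) (b : Option Int) (s : Int) : Option Int :=
  if s ≤ T && pvGtB b s then some s else b

-- "a is bounded above by c" on Option Int with none = -inf
def pvOle (a c : Option Int) : Prop := ∀ m, a = some m → ∃ m', c = some m' ∧ m ≤ m'

lemma pvOle_refl (a : Option Int) : pvOle a a := by
  intro m h; exact ⟨m, h, le_refl m⟩

lemma pvOle_trans {a b c : Option Int} (h1 : pvOle a b) (h2 : pvOle b c) : pvOle a c := by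
  intro m h
  obtain ⟨m', hb, hm⟩ := h1 m h
  obtain ⟨m'', hc, hm'⟩ := h2 m' hb
  exact ⟨m'', hc, le_trans hm hm'⟩

lemma pvOle_antisymm {a c : Option Int} (h1 : pvOle a c) (h2 : pvOle c a) : a = c := by
  cases a with
  | none =>
    cases c with
    | none => rfl
    | some m =>
      obtain ⟨m', ha, _⟩ := h2 m rfl
      exact absurd ha (by simp)
  | some m =>
    obtain ⟨m', hc, hm⟩ := h1 m rfl
    cases c with
    | none => exact absurd hc (by simp)
    | some m'' =>
      obtain ⟨m''', ha, hm'⟩ := h2 m'' rfl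
      simp only [Option.some.injEq] at hc ha
      subst hc; subst ha
      exact congrArg some (le_antisymm hm hm')

-- characterisation of a running-max style fold, for any step with these three pointwise properties
lemma pvFoldChar (T : Int) (f : Option Int → Int → Option Int)
    (h1 : ∀ b s, pvOle b (f b s))
    (h2 : ∀ b s, s ≤ T → pvOle (some s) (f b s))
    (h3 : ∀ b s, f b s = b ∨ (s ≤ T ∧ f b s = some s)) :
    ∀ (l : List Int) (b : Option Int),
      pvOle b (l.foldl f b) ∧ (∀ s ∈ l, s ≤ T → pvOle (some s) (l.foldl f b)) ∧
        (l.foldl f b = b ∨ ∃ s ∈ l, s ≤ T ∧ l.foldl f b = some s) := by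
  intro l
  induction l with
  | nil => intro b; exact ⟨pvOle_refl b, by simp, Or.inl rfl⟩
  | cons x xs ih =>
    intro b
    obtain ⟨i1, i2, i3⟩ := ih (f b x)
    refine ⟨pvOle_trans (h1 b x) i1, ?_, ?_⟩
    · intro s hs hsT
      rcases List.mem_cons.mp hs with hs | hs
      · subst hs
        exact pvOle_trans (h2 b s hsT) i1
      · exact i2 s hs hsT
    · rcases i3 with h | ⟨s, hs, hsT, hr⟩
      · rcases h3 b x with h' | ⟨hxT, h'⟩
        · exact Or.inl (by rw [List.foldl_cons, h, h'])
        · exact Or.inr ⟨x, by simp, hxT, by rw [List.foldl_cons, h, h']⟩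
      · exact Or.inr ⟨s, List.mem_cons_of_mem _ hs, hsT, by rw [List.foldl_cons]; exact hr⟩

lemma pvAStep_props (T : Int) :
    (∀ b s, pvOle b (pvAStep T b s)) ∧ (∀ b s, s ≤ T → pvOle (some s) (pvAStep T b s)) ∧
      (∀ b s, pvAStep T b s = b ∨ (s ≤ T ∧ pvAStep T b s = some s)) := by
  refine ⟨?_, ?_, ?_⟩
  · intro b s m hb
    subst hb
    by_cases h : s ≤ T ∧ m ≤ s
    · exact ⟨s, by simp [pvAStep, h.1, h.2], h.2⟩
    · refine ⟨m, ?_, le_refl m⟩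
      rcases not_and_or.mp h with h' | h' <;> simp [pvAStep, h']
  · intro b s hsT m hm
    simp only [Option.some.injEq] at hm
    subst hm
    cases b with
    | none => exact ⟨s, by simp [pvAStep, hsT], le_refl s⟩
    | some m' =>
      by_cases h : m' ≤ s
      · exact ⟨s, by simp [pvAStep, hsT, h], le_refl s⟩
      · exact ⟨m', by simp [pvAStep, h], le_of_not_ge h⟩
  · intro b s
    by_cases h : (s ≤ T && pvGeB b s) = true
    · refine Or.inr ⟨?_, by simp [pvAStep, h]⟩
      simp only [Bool.and_eq_true, decide_eq_true_eq] at h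
      exact h.1
    · exact Or.inl (by simp [pvAStep, h])

lemma pvBStep_props (T : Int) :
    (∀ b s, pvOle b (pvBStep T b s)) ∧ (∀ b s, s ≤ T → pvOle (some s) (pvBStep T b s)) ∧
      (∀ b s, pvBStep T b s = b ∨ (s ≤ T ∧ pvBStep T b s = some s)) := by
  refine ⟨?_, ?_, ?_⟩
  · intro b s m hb
    subst hb
    by_cases h : s ≤ T ∧ m < s
    · exact ⟨s, by simp [pvBStep, h.1, h.2], le_of_lt h.2⟩
    · refine ⟨m, ?_, le_refl m⟩
      rcases not_and_or.mp h with h' | h' <;> simp [pvBStep, h']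
  · intro b s hsT m hm
    simp only [Option.some.injEq] at hm
    subst hm
    cases b with
    | none => exact ⟨s, by simp [pvBStep, hsT], le_refl s⟩
    | some m' =>
      by_cases h : m' < s
      · exact ⟨s, by simp [pvBStep, hsT, h], le_refl s⟩
      · exact ⟨m', by simp [pvBStep, h], le_of_not_gt h⟩
  · intro b s
    by_cases h : (s ≤ T && pvGtB b s) = true
    · refine Or.inr ⟨?_, by simp [pvBStep, h]⟩
      simp only [Bool.and_eq_true, decide_eq_true_eq] at h
      exact h.1
    · exact Or.inl (by simp [pvBStep, h])

-- two running-max folds over lists with the same valid members agree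
lemma pvFold_eq (T : Int) (f g : Option Int → Int → Option Int) (S1 S2 : List Int) (b : Option Int)
    (hf : (∀ b s, pvOle b (f b s)) ∧ (∀ b s, s ≤ T → pvOle (some s) (f b s)) ∧
      (∀ b s, f b s = b ∨ (s ≤ T ∧ f b s = some s)))
    (hg : (∀ b s, pvOle b (g b s)) ∧ (∀ b s, s ≤ T → pvOle (some s) (g b s)) ∧
      (∀ b s, g b s = b ∨ (s ≤ T ∧ g b s = some s)))
    (hm : ∀ s, s ≤ T → (s ∈ S1 ↔ s ∈ S2)) :
    S1.foldl f b = S2.foldl g b := by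
  obtain ⟨f1, f2, f3⟩ := pvFoldChar T f hf.1 hf.2.1 hf.2.2 S1 b
  obtain ⟨g1, g2, g3⟩ := pvFoldChar T g hg.1 hg.2.1 hg.2.2 S2 b
  apply pvOle_antisymm
  · rcases f3 with h | ⟨s, hs, hsT, hr⟩
    · rw [h]; exact g1
    · rw [hr]; exact g2 s ((hm s hsT).mp hs) hsT
  · rcases g3 with h | ⟨s, hs, hsT, hr⟩
    · rw [h]; exact f1
    · rw [hr]; exact f2 s ((hm s hsT).mpr hs) hsT

-- A's inner loop, as a fold over the filtered (forward, return) pairs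
lemma pvA_inner (retL : List (List Int)) (T i m : Int) (st : Option Int × PySem.Dict Int (List (List Int))) :
    retL.foldl
      (fun st r =>
        let id2 := pvGetI r 0
        let miles2 := pvGetI r 1
        if miles2 ≥ T then st
        else if m + miles2 ≤ T && pvGeB st.1 (m + miles2) then
          (some (m + miles2), st.2.modify (m + miles2) [] (· ++ [[i, id2]]))
        else st)
      st
    = ((pvKeep retL T).map (fun q => ((i, m), q))).foldl (pvPairStep T) st := by
  unfold pvKeep
  rw [List.map_map, List.foldl_map]
  rw [← PySem.List.foldl_ite_eq_foldl_filter (p := fun r => pvGetI r 1 < T)]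
  apply PySem.List.foldl_congr_mem
  intro st' r _
  by_cases h' : pvGetI r 1 < T
  · simp only [if_pos h', if_neg (not_le.mpr h')]
    simp [pvPairStep, pvSum]
  · rw [if_neg h', if_pos (not_lt.mp h')]

-- A's nested loop, flattened to one fold over the filtered (forward, return) pairs
lemma pvA_norm (fwdL retL : List (List Int)) (T : Int) :
    pvAState fwdL retL T = (pvPairs fwdL retL T).foldl (pvPairStep T) (none, PySem.Dict.empty) := by
  unfold pvAState pvPairs
  rw [List.foldl_flatMap]
  rw [show pvKeep fwdL T = (fwdL.filter (fun f => decide (pvGetI f 1 < T))).map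
      (fun f => (pvGetI f 0, pvGetI f 1)) from rfl]
  rw [List.foldl_map (l := fwdL.filter (fun f => decide (pvGetI f 1 < T)))]
  rw [← PySem.List.foldl_ite_eq_foldl_filter (p := fun f => pvGetI f 1 < T)]
  apply PySem.List.foldl_congr_mem
  intro st f _
  by_cases h : pvGetI f 1 < T
  · rw [if_neg (not_le.mpr h), if_pos h]
    exact pvA_inner retL T (pvGetI f 0) (pvGetI f 1) st
  · rw [if_pos (not_lt.mp h), if_neg h]

-- the max component of A's fold ignores the dict
lemma pvA_fst (T : Int) (L : List ((Int × Int) × (Int × Int))) :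
    ∀ (b : Option Int) (d : PySem.Dict Int (List (List Int))),
      (L.foldl (pvPairStep T) (b, d)).1 = (L.map pvSum).foldl (pvAStep T) b := by
  induction L with
  | nil => intro b d; rfl
  | cons x xs ih =>
    intro b d
    simp only [List.foldl_cons, List.map_cons]
    by_cases h : (pvSum x ≤ T && pvGeB b (pvSum x)) = true
    · simp only [pvPairStep, pvAStep, if_pos h]; exact ih _ _
    · simp only [pvPairStep, pvAStep, if_neg h]; exact ih _ _

-- A's dict at the final best key collects exactly the pairs whose sum is that key
lemma pvA_dict (T : Int) (L : List ((Int × Int) × (Int × Int))) :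
    ∀ (b : Option Int) (d : PySem.Dict Int (List (List Int))) (v : Int), v ≤ T →
      (∀ m, b = some m → m ≤ v) → (∀ pq ∈ L, pvSum pq ≤ T → pvSum pq ≤ v) →
      ((L.foldl (pvPairStep T) (b, d)).2).getD v [] =
        d.getD v [] ++ (L.filter (fun pq => decide (pvSum pq = v))).map (fun pq => [pq.1.1, pq.2.1]) := by
  induction L with
  | nil => intro b d v _ _ _; simp
  | cons x xs ih =>
    intro b d v hvT hb hub
    simp only [List.foldl_cons, List.filter_cons]
    by_cases h : (pvSum x ≤ T && pvGeB b (pvSum x)) = true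
    · have hxle : pvSum x ≤ T := by
        simp only [Bool.and_eq_true, decide_eq_true_eq] at h; exact h.1
      have hxv : pvSum x ≤ v := hub x (by simp) hxle
      have hb' : ∀ m, (some (pvSum x) : Option Int) = some m → m ≤ v := by
        intro m hm
        simp only [Option.some.injEq] at hm
        omega
      have hstep : pvPairStep T (b, d) x =
          (some (pvSum x), d.modify (pvSum x) [] (· ++ [[x.1.1, x.2.1]])) := by
        simp [pvPairStep, h]
      rw [hstep, ih _ _ v hvT hb' (fun pq hpq hle => hub pq (List.mem_cons_of_mem _ hpq) hle)]
      rw [PySem.Dict.getD_modify]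
      by_cases hxv' : pvSum x = v
      · simp [hxv', List.append_assoc]
      · simp [hxv', Ne.symm hxv']
    · have hxv' : pvSum x ≠ v := by
        intro hxv
        apply h
        simp only [Bool.and_eq_true, decide_eq_true_eq]
        refine ⟨by omega, ?_⟩
        cases b with
        | none => rfl
        | some m => simpa [hxv] using hb m rfl
      have hstep : pvPairStep T (b, d) x = (b, d) := by simp [pvPairStep, h]
      rw [hstep, if_neg (by simpa using hxv')]
      exact ih b d v hvT hb (fun pq hpq hle => hub pq (List.mem_cons_of_mem _ hpq) hle)

-- B's bucket dict, as a fold over the filtered (miles, id) pairs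
lemma pvB_buckets (retL : List (List Int)) (T : Int) :
    pvBBuckets retL T =
      ((pvKeep retL T).map (fun q => (q.2, q.1))).foldl
        (fun d p => d.modify p.1 [] (· ++ [p.2])) PySem.Dict.empty := by
  unfold pvBBuckets pvKeep
  rw [PySem.List.foldl_ite_eq_foldl_filter (p := fun r => pvGetI r 1 < T)]
  rw [List.map_map, List.foldl_map]
  rfl

-- membership in the bucket keys = being a filtered return mileage
lemma pvB_keys_mem (retL : List (List Int)) (T : Int) (k : Int) :
    k ∈ (pvBBuckets retL T).keys ↔ ∃ q ∈ pvKeep retL T, q.2 = k := by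
  rw [pvB_buckets]
  rw [PySem.Dict.keys_foldl_modify_key (key := fun p : Int × Int => p.1)
    (f := fun d p => (· ++ [p.2])) (d0 := [])]
  rw [PySem.Set.mem_update]
  simp [List.mem_map, PySem.Dict.keys_empty]

-- B's best value, as a single running-max fold
lemma pvB_best (fwdL retL : List (List Int)) (T : Int) :
    pvBBest (pvBFwd fwdL T) (pvBBuckets retL T) T =
      ((pvBFwd fwdL T).flatMap (fun p => (pvBBuckets retL T).keys.map (fun k => p.2 + k))).foldl
        (pvBStep T) none := by
  unfold pvBBest
  rw [List.foldl_flatMap]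
  apply PySem.List.foldl_congr_mem
  intro b p _
  rw [List.foldl_map]
  rfl

-- the two best values agree
lemma pvBest_eq (fwdL retL : List (List Int)) (T : Int) :
    ((pvPairs fwdL retL T).map pvSum).foldl (pvAStep T) none =
      pvBBest (pvBFwd fwdL T) (pvBBuckets retL T) T := by
  rw [pvB_best]
  apply pvFold_eq T _ _ _ _ none (pvAStep_props T) (pvBStep_props T)
  intro s _
  constructor
  · intro hs
    obtain ⟨pq, hpq, hsum⟩ := List.mem_map.mp hs
    obtain ⟨p, hp, hq⟩ := List.mem_flatMap.mp (show pq ∈ (pvKeep fwdL T).flatMap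
      (fun p => (pvKeep retL T).map (fun q => (p, q))) from hpq)
    obtain ⟨q, hq', hpq'⟩ := List.mem_map.mp hq
    subst hpq'
    refine List.mem_flatMap.mpr ⟨p, hp, List.mem_map.mpr ⟨q.2, (pvB_keys_mem retL T q.2).mpr
      ⟨q, hq', rfl⟩, ?_⟩⟩
    simpa [pvSum] using hsum
  · intro hs
    obtain ⟨p, hp, hk'⟩ := List.mem_flatMap.mp hs
    obtain ⟨k, hk, hsk⟩ := List.mem_map.mp hk'
    obtain ⟨q, hq, hqk⟩ := (pvB_keys_mem retL T k).mp hk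
    refine List.mem_map.mpr ⟨(p, q), ?_, by simp only [pvSum]; omega⟩
    exact List.mem_flatMap.mpr ⟨p, hp, List.mem_map.mpr ⟨q, hq, rfl⟩⟩

-- emission: the bucket lookup reproduces A's per-forward filtered scan
lemma pvEmit_eq (fwdL retL : List (List Int)) (T v : Int) :
    (pvBFwd fwdL T).flatMap
        (fun p => ((pvBBuckets retL T).getD (v - p.2) []).map (fun id2 => [p.1, id2])) =
      ((pvPairs fwdL retL T).filter (fun pq => decide (pvSum pq = v))).map
        (fun pq => [pq.1.1, pq.2.1]) := by
  unfold pvPairs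
  rw [List.filter_flatMap, List.map_flatMap]
  rw [show pvBFwd fwdL T = pvKeep fwdL T from rfl]
  congr 1
  funext p
  rw [pvB_buckets, PySem.Dict.getD_foldl_modify_append]
  simp only [PySem.Dict.getD_empty, List.nil_append, List.filter_map, List.map_map]
  rw [List.filter_congr (l := pvKeep retL T)
    (q := fun q : Int × Int => decide (pvSum (p, q) = v))
    (fun q _ => by by_cases hq : p.2 + q.2 = v
                   · simp [pvSum, show q.2 = v - p.2 by omega]
                   · simp [pvSum, hq, show q.2 ≠ v - p.2 by omega])]
  rfl

-- ===== VERDICT =====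

theorem close_to_target_spec : Claim_equal_close_to_target := by
  intro fwdL retL T _ _
  unfold Spec_close_to_target close_to_target close_to_target_alt
  rw [pvA_norm, pvA_fst, pvBest_eq]
  cases hb : pvBBest (pvBFwd fwdL T) (pvBBuckets retL T) T with
  | none => rfl
  | some v =>
    have hA : ((pvPairs fwdL retL T).map pvSum).foldl (pvAStep T) none = some v := by
      rw [pvBest_eq]; exact hb
    obtain ⟨_, c2, c3⟩ := pvFoldChar T (pvAStep T) (pvAStep_props T).1 (pvAStep_props T).2.1
      (pvAStep_props T).2.2 ((pvPairs fwdL retL T).map pvSum) none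
    rw [hA] at c2 c3
    have hvT : v ≤ T := by
      rcases c3 with h | ⟨s, _, hsT, hr⟩
      · exact absurd h (by simp)
      · simp only [Option.some.injEq] at hr; omega
    have hub : ∀ pq ∈ pvPairs fwdL retL T, pvSum pq ≤ T → pvSum pq ≤ v := by
      intro pq hpq hle
      obtain ⟨m', hm', hle'⟩ := c2 (pvSum pq) (List.mem_map_of_mem hpq) hle (pvSum pq) rfl
      simp only [Option.some.injEq] at hm'
      omega
    show ((pvPairs fwdL retL T).foldl (pvPairStep T) (none, PySem.Dict.empty)).2.getD v [] =
      (pvBFwd fwdL T).flatMap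
        (fun p => ((pvBBuckets retL T).getD (v - p.2) []).map (fun id2 => [p.1, id2]))
    rw [pvA_dict T (pvPairs fwdL retL T) none PySem.Dict.empty v hvT (by simp) hub]
    rw [pvEmit_eq fwdL retL T v]
    simp
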